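-- pv_equiv track=rewrite | github.com/watacodes/codewars-practice | June 2023/2023-06-20/What's up next?/main.py | next_item
-- ===== SOURCE A (Python) =====
-- def next_item(xs, item):
--     arr = iter(xs)
--     isFound = False
--     for i in arr:
--         if isFound:
--             return i
--         if i == item:
--             isFound = True
--     return None
-- ===== SOURCE B (Python) =====
-- def next_item(xs, item):
--     # View the list as its sequence of adjacent pairs (a, b); the answer is the
--     # second component of the first pair whose first component equals item.
--     # An item occurring only as the last element has no pair, giving None.
--     return next((b for a, b in zip(xs, xs[1:]) if a == item), None)
-- ===== Notes on version B (the rewrite author's own statement) =====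
-- stated objective: simpler
-- what changed: Replaces the flag-carrying state machine with a scan over the list's adjacent pairs zip(xs, xs[1:]), returning the successor component of the first pair keyed by item; no flag, no index, the last-element case falls out because the last element has no pair.
import Mathlib
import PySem

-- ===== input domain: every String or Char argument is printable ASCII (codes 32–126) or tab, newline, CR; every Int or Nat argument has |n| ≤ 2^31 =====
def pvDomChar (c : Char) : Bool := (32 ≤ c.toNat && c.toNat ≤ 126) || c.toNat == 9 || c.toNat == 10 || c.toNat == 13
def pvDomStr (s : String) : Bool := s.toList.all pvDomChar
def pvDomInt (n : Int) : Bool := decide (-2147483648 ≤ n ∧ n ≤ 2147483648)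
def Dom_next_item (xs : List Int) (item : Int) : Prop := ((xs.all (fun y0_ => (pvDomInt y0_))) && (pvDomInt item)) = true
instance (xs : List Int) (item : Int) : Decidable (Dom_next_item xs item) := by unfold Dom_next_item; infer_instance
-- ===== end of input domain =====

-- B replaces A's flag-carrying scan by a search over the list's adjacent pairs zip(xs, xs[1:]) (objective: simpler).


-- ===== PORT A =====
-- the for-loop over the iterator, carrying the isFound flag
def nextItemGo (item : Int) : List Int → Bool → Option Int
  | [], _ => none
  | i :: rest, isFound =>
      if isFound then some i
      else nextItemGo item rest (isFound || (i == item))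

def next_item (xs : List Int) (item : Int) : Option Int :=
  nextItemGo item xs false

-- ===== PORT B =====
-- zip(xs, xs[1:]) (xs[1:] is exactly drop 1 of the list); find? = first match of
-- the generator's condition; .map Prod.snd = yielding b; none = the default None.
def next_item_alt (xs : List Int) (item : Int) : Option Int :=
  ((xs.zip (xs.drop 1)).find? (fun p => p.1 == item)).map Prod.snd

-- ===== PRECONDITION & SPEC =====
def Spec_next_item (xs : List Int) (item : Int) (out : Option Int) : Prop := out = next_item_alt xs item
instance (xs : List Int) (item : Int) (out : Option Int) : Decidable (Spec_next_item xs item out) := by unfold Spec_next_item; infer_instance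

-- ===== CLAIM (what is proved, stated in full; the proofs are below) =====
def Claim_equal_next_item : Prop := ∀ (xs : List Int) (item : Int), Dom_next_item xs item → Spec_next_item xs item (next_item xs item)

-- ===== LEMMAS AND PROOFS =====
theorem nextItemGo_true (item : Int) (xs : List Int) :
    nextItemGo item xs true = xs.head? := by
  cases xs <;> simp [nextItemGo]

theorem next_item_eq_alt (xs : List Int) (item : Int) :
    next_item xs item = next_item_alt xs item := by
  induction xs with
  | nil => rfl
  | cons x rest ih =>
    have hA : next_item (x :: rest) item
        = if x = item then rest.head? else next_item rest item := by
      by_cases hx : x = item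
      · simp [next_item, nextItemGo, hx, nextItemGo_true]
      · rw [if_neg hx]
        simp [next_item, nextItemGo, show (x == item) = false by simp [hx]]
    rw [hA]
    cases rest with
    | nil =>
      by_cases hx : x = item <;> simp [hx, next_item_alt, next_item, nextItemGo]
    | cons y ys =>
      have hzip : ((x :: y :: ys).zip ((x :: y :: ys).drop 1))
          = (x, y) :: ((y :: ys).zip ((y :: ys).drop 1)) := by simp
      by_cases hx : x = item
      · simp [next_item_alt, hx]
      · simp only [next_item_alt, hzip, List.find?_cons,
          show ((x, y).1 == item) = false by simp [hx]]
        rw [if_neg hx]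
        exact ih

-- ===== VERDICT (by name: the statement is the Claim_ definition above) =====
theorem next_item_spec : Claim_equal_next_item := by
  intro xs item _
  exact next_item_eq_alt xs item
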